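-- pv_equiv track=rewrite | github.com/guqtls14/python-algorism-study | 박상준/유플러스/1번.py | solution
-- ===== SOURCE A (Python) =====
-- def solution(arr):
--     answer = set()
--     arr.sort(key=lambda x: len(str(x)))
--
--     for value in arr:
--         value = sorted(list(str(value)))
--         tmp = ''
--         for i in value:
--             tmp += i
--         answer.add(tmp)
--
--     return len(answer)
-- ===== SOURCE B (Python) =====
-- def solution(arr):
--     # B: canonicalize each value by a character-frequency vector over "-0123456789"
--     # instead of a sorted-character string; set built by a comprehension.
--     # Keeps A's in-place length sort (it mutates the caller's list).
--     arr.sort(key=lambda x: len(str(x)))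
--     return len({tuple(str(v).count(c) for c in "-0123456789") for v in arr})
-- ===== Notes on version B (the rewrite author's own statement) =====
-- stated objective: alternative
-- what changed: Each number is canonicalized by a fixed character-frequency vector (counts of '-' and each digit) collected in a set comprehension, instead of sorting the characters of its string and concatenating them in an inner loop; the two keys are in bijection so the count of distinct keys is identical.
import Mathlib
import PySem

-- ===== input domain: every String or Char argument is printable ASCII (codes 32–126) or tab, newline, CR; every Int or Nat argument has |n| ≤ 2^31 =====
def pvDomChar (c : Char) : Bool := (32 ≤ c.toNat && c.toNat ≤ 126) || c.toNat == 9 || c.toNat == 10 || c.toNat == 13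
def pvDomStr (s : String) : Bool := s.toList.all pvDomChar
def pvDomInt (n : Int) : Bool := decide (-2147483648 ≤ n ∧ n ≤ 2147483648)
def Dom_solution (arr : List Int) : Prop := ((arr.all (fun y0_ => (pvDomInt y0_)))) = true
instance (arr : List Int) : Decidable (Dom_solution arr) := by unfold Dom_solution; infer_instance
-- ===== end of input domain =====

-- B replaces A's sorted-character-string canonical key by a character-frequency vector
-- over "-0123456789" built in a set comprehension (alternative decomposition, not faster);
-- both implementations perform the same in-place length sort of the argument (return-value
-- equivalence; the observable mutation is identical).


-- ===== PORT A =====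
def solution (arr : List Int) : Int :=
  let arr1 := PySem.List.sorted arr (fun x => (PySem.Int.toChars x).length) false
  let answer : PySem.Set (List Char) :=
    arr1.foldl (fun answer value =>
      let value2 := PySem.List.sorted (PySem.Int.toChars value) (fun x => x) false
      let tmp := value2.foldl (fun tmp i => tmp ++ [i]) ([] : List Char)
      PySem.Set.add answer tmp) PySem.Set.empty
  PySem.Set.len answer

-- ===== PORT B =====
def pvKeyChars : List Char := ['-','0','1','2','3','4','5','6','7','8','9']
def pvCountVec (v : Int) : List Int :=
  pvKeyChars.map (fun c => ((PySem.Int.toChars v).count c : Int))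
def solution_alt (arr : List Int) : Int :=
  let arr1 := PySem.List.sorted arr (fun x => (PySem.Int.toChars x).length) false
  PySem.Set.len (PySem.Set.ofList (arr1.map pvCountVec))

-- ===== PRECONDITION & SPEC =====
def Spec_solution (arr : List Int) (out : Int) : Prop := out = solution_alt arr
instance (arr : List Int) (out : Int) : Decidable (Spec_solution arr out) := by unfold Spec_solution; infer_instance
-- ===== CLAIM (what is proved, stated in full; the proofs are below) =====
def Claim_equal_solution : Prop := ∀ (arr : List Int), Dom_solution arr → Spec_solution arr (solution arr)

-- ===== LEMMAS AND PROOFS =====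
theorem pv_digitChar_mem (m : Nat) (h : m < 10) : m.digitChar ∈ pvKeyChars := by
  interval_cases m <;> decide

theorem pv_toDigitsCore_mem (f : Nat) : ∀ (n : Nat) (acc : List Char) (c : Char),
    c ∈ Nat.toDigitsCore 10 f n acc → c ∈ pvKeyChars ∨ c ∈ acc := by
  induction f with
  | zero => intro n acc c h; simp [Nat.toDigitsCore] at h; exact Or.inr h
  | succ f ih =>
    intro n acc c h
    simp only [Nat.toDigitsCore] at h
    by_cases hz : n / 10 = 0
    · simp only [hz, if_pos] at h
      rcases List.mem_cons.mp h with h | h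
      · exact Or.inl (h ▸ pv_digitChar_mem _ (Nat.mod_lt _ (by norm_num)))
      · exact Or.inr h
    · simp only [hz, reduceIte] at h
      rcases ih _ _ _ h with h' | h'
      · exact Or.inl h'
      · rcases List.mem_cons.mp h' with h'' | h''
        · exact Or.inl (h'' ▸ pv_digitChar_mem _ (Nat.mod_lt _ (by norm_num)))
        · exact Or.inr h''

theorem pv_toChars_mem (v : Int) (c : Char) (h : c ∈ PySem.Int.toChars v) : c ∈ pvKeyChars := by
  unfold PySem.Int.toChars Nat.toDigits at h
  split at h
  · rcases List.mem_cons.mp h with h | h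
    · simp [h]; decide
    · rcases pv_toDigitsCore_mem _ _ _ _ h with h' | h'
      · exact h'
      · simp at h'
  · rcases pv_toDigitsCore_mem _ _ _ _ h with h' | h'
    · exact h'
    · simp at h'

-- the two canonical keys induce the same equivalence on Int
theorem pv_key_iff (x y : Int) :
    ((PySem.List.sorted (PySem.Int.toChars x) (fun c => c) false
      = PySem.List.sorted (PySem.Int.toChars y) (fun c => c) false)
    ↔ pvCountVec x = pvCountVec y) := by
  rw [PySem.List.sorted_id_eq_sorted_id_iff_perm]
  constructor
  · intro hp
    unfold pvCountVec
    refine List.map_inj_left.mpr (fun c _ => ?_)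
    exact congrArg Int.ofNat (hp.count_eq c)
  · intro hv
    rw [List.perm_iff_count]
    intro c
    by_cases hc : c ∈ pvKeyChars
    · have := List.map_inj_left.mp hv c hc
      exact Int.ofNat.inj this
    · rw [List.count_eq_zero.mpr (fun h => hc (pv_toChars_mem x c h)),
          List.count_eq_zero.mpr (fun h => hc (pv_toChars_mem y c h))]

-- parallel set-building: same equivalence ⇒ same number of distinct keys
theorem pv_len_eq {α β : Type} [BEq α] [LawfulBEq α] [BEq β] [LawfulBEq β]
    (f : Int → α) (g : Int → β)
    (hk : ∀ x y : Int, f x = f y ↔ g x = g y) :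
    ∀ (l : List Int) (s : PySem.Set α) (t : PySem.Set β),
    (∀ a ∈ l, (f a ∈ s ↔ g a ∈ t)) → s.length = t.length →
    (l.foldl (fun s a => PySem.Set.add s (f a)) s).length
      = (l.foldl (fun t a => PySem.Set.add t (g a)) t).length := by
  intro l
  induction l with
  | nil => intro s t _ hlen; simpa using hlen
  | cons x l ih =>
    intro s t hm hlen
    simp only [List.foldl_cons]
    apply ih
    · intro a ha
      rw [PySem.Set.mem_add, PySem.Set.mem_add]
      constructor
      · rintro (h | h)
        · exact Or.inl ((hm a (List.mem_cons_of_mem _ ha)).mp h)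
        · exact Or.inr ((hk a x).mp h)
      · rintro (h | h)
        · exact Or.inl ((hm a (List.mem_cons_of_mem _ ha)).mpr h)
        · exact Or.inr ((hk a x).mpr h)
    · by_cases hfx : f x ∈ s
      · rw [PySem.Set.add_of_mem hfx,
            PySem.Set.add_of_mem ((hm x (List.mem_cons_self)).mp hfx)]
        exact hlen
      · rw [PySem.Set.add_of_not_mem hfx,
            PySem.Set.add_of_not_mem (fun h => hfx ((hm x (List.mem_cons_self)).mpr h))]
        simp [hlen]

-- ===== VERDICT (by name: the statement is the Claim_ definition above) =====
theorem solution_spec : Claim_equal_solution := by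
  intro arr _
  unfold Spec_solution solution solution_alt
  simp only [PySem.List.foldl_append_singleton_eq_self, List.nil_append,
    PySem.Set.ofList_eq_foldl, List.foldl_map, PySem.Set.len]
  exact congrArg Int.ofNat (pv_len_eq _ _ pv_key_iff _ _ _
    (fun a _ => by constructor <;> (intro h; simp [PySem.Set.empty] at h)) rfl)
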